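-- pv_equiv track=rewrite | github.com/MozartMMF/algoritmos-e-estrutura-de-dados | Lista05/Q2L5.py | validar_arvore_binaria
-- ===== SOURCE A (Python) =====
-- from collections import defaultdict, deque
--
-- def validar_arvore_binaria(arestas):
--
--     if not arestas:
--         return True
--
--     adjacencia = defaultdict(list)
--     filhos_set = set()
--     todos_nos = set()
--
--     for pai, filho in arestas:
--         if pai == filho:
--             return False
--
--         if filho in filhos_set:
--             return False
--
--         adjacencia[pai].append(filho)
--         filhos_set.add(filho)
--         todos_nos.add(pai)
--         todos_nos.add(filho)
--
--         if len(adjacencia[pai]) > 2: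
--             return False
--
--     possiveis_raizes = todos_nos - filhos_set
--
--     if len(possiveis_raizes) != 1:
--         return False
--
--     raiz = possiveis_raizes.pop()
--
--     fila = deque([raiz])
--     visitados = {raiz}
--
--     while fila:
--         no_atual = fila.popleft()
--
--         for vizinho in adjacencia[no_atual]:
--             if vizinho in visitados:
--                 return False
--
--             visitados.add(vizinho)
--             fila.append(vizinho)
--
--     return len(visitados) == len(todos_nos)
-- ===== SOURCE B (Python) =====
-- def validar_arvore_binaria(arestas):
--     # Same result as the adjacency+BFS version, but via a child->parent map and
--     # upward root-climbing: no adjacency lists, no queue.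
--     if not arestas:
--         return True
--
--     parent = {}
--     nchildren = {}
--
--     for pai, filho in arestas:
--         if pai == filho:
--             return False
--         if filho in parent:
--             return False
--         parent[filho] = pai
--         nchildren[pai] = nchildren.get(pai, 0) + 1
--         if nchildren[pai] > 2:
--             return False
--
--     nodes = set(parent) | set(nchildren)
--     raizes = [n for n in nodes if n not in parent]
--
--     if len(raizes) != 1:
--         return False
--
--     raiz = raizes[0]
--
--     for n in nodes:
--         cur = n
--         for _ in range(len(nodes)):
--             if cur == raiz:
--                 break
--             cur = parent.get(cur, cur)
--         if cur != raiz: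
--             return False
--
--     return True
-- ===== Notes on version B (the rewrite author's own statement) =====
-- stated objective: alternative
-- what changed: Replaces the adjacency-list + BFS-from-root connectivity check with a child->parent map plus per-node upward root-climbing (bounded parent-pointer walk), keeping the per-edge self-loop/duplicate-child/>2-children checks.
import Mathlib
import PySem

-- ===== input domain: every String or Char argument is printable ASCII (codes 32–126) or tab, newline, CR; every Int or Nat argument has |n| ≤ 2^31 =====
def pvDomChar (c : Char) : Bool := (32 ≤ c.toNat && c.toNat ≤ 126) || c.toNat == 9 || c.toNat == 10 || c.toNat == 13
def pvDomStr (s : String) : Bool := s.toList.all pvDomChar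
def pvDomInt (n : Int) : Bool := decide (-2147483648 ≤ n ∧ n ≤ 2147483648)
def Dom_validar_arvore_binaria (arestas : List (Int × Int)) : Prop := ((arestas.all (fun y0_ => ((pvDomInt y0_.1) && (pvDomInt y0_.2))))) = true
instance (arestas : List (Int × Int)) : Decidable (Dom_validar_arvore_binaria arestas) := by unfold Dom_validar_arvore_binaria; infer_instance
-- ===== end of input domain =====

-- B replaces A's adjacency-list + BFS connectivity check by a child->parent map with
-- per-node upward root-climbing (alternative algorithm; same return value everywhere).

-- ===== PORT A =====

-- the edge loop: builds adjacency, children set, node set; none = early 'return False'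
def pvA_loop : List (Int × Int) → PySem.Dict Int (List Int) → PySem.Set Int → PySem.Set Int →
    Option (PySem.Dict Int (List Int) × PySem.Set Int × PySem.Set Int)
  | [], adj, f, t => some (adj, f, t)
  | (pai, filho) :: rest, adj, f, t =>
    if pai = filho then none
    else if PySem.Set.contains f filho then none
    else
      let adj' := adj.insert pai (adj.getD pai [] ++ [filho])
      let f' := PySem.Set.add f filho
      let t' := PySem.Set.add (PySem.Set.add t pai) filho
      if 2 < (adj'.getD pai []).length then none
      else pvA_loop rest adj' f' t'

-- the inner 'for vizinho in adjacencia[no_atual]' loop; none = 'return False' (revisit)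
def pvA_inner : PySem.Set Int → List Int → List Int → Option (PySem.Set Int × List Int)
  | vis, fila, [] => some (vis, fila)
  | vis, fila, w :: ws =>
    if PySem.Set.contains vis w then none
    else pvA_inner (PySem.Set.add vis w) (fila ++ [w]) ws

-- the BFS 'while fila' loop (fuel is an upper bound on iterations, proved sufficient below)
def pvA_bfs (adj : PySem.Dict Int (List Int)) (t : PySem.Set Int) :
    Nat → PySem.Set Int → List Int → Bool
  | 0, _, _ => false
  | fuel + 1, vis, fila =>
    match fila with
    | [] => vis.length == t.length
    | u :: rest =>
      match pvA_inner vis rest (adj.getD u []) with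
      | none => false
      | some (vis', fila') => pvA_bfs adj t fuel vis' fila'

def validar_arvore_binaria (arestas : List (Int × Int)) : Bool :=
  if arestas = [] then true
  else
    match pvA_loop arestas PySem.Dict.empty PySem.Set.empty PySem.Set.empty with
    | none => false
    | some (adj, f, t) =>
      let raizes := PySem.Set.diff t f
      if raizes.length ≠ 1 then false
      else
        let raiz := raizes.headD 0
        pvA_bfs adj t (t.length + 1) (PySem.Set.add PySem.Set.empty raiz) [raiz]

-- ===== PORT B =====

-- the edge loop: builds child->parent map and children counters; none = early 'return False'
def pvB_loop : List (Int × Int) → PySem.Dict Int Int → PySem.Dict Int Int →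
    Option (PySem.Dict Int Int × PySem.Dict Int Int)
  | [], p, k => some (p, k)
  | (pai, filho) :: rest, p, k =>
    if pai = filho then none
    else if (p.get? filho).isSome then none
    else
      let p' := p.insert filho pai
      let k' := k.insert pai (k.getD pai 0 + 1)
      if 2 < k'.getD pai 0 then none
      else pvB_loop rest p' k'

-- the bounded 'for _ in range(m): if cur == raiz: break; cur = parent.get(cur, cur)' walk
def pvB_climb (p : PySem.Dict Int Int) (raiz : Int) : Nat → Int → Int
  | 0, cur => cur
  | m + 1, cur => if cur = raiz then cur else pvB_climb p raiz m (p.getD cur cur)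

def validar_arvore_binaria_alt (arestas : List (Int × Int)) : Bool :=
  if arestas = [] then true
  else
    match pvB_loop arestas PySem.Dict.empty PySem.Dict.empty with
    | none => false
    | some (p, k) =>
      let nodes := PySem.Set.union (PySem.Set.ofList p.keys) k.keys
      let raizes := nodes.filter (fun n => !(p.contains n))
      if raizes.length ≠ 1 then false
      else
        let raiz := raizes.headD 0
        nodes.all (fun n => pvB_climb p raiz nodes.length n == raiz)

-- ===== PRECONDITION & SPEC =====
def Spec_validar_arvore_binaria (arestas : List (Int × Int)) (out : Bool) : Prop := out = validar_arvore_binaria_alt arestas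
instance (arestas : List (Int × Int)) (out : Bool) : Decidable (Spec_validar_arvore_binaria arestas out) := by unfold Spec_validar_arvore_binaria; infer_instance

-- ===== CLAIM (what is proved, stated in full; the proofs are below) =====
def Claim_equal_validar_arvore_binaria : Prop := ∀ (arestas : List (Int × Int)), Dom_validar_arvore_binaria arestas → Spec_validar_arvore_binaria arestas (validar_arvore_binaria arestas)

-- ===== LEMMAS AND PROOFS =====

-- the ancestor chain: chaink p k v = the k-th parent of v (none if the chain runs out)
def pvChain (p : PySem.Dict Int Int) : Nat → Int → Option Int
  | 0, v => some v
  | k + 1, v => (p.get? v).bind (pvChain p k)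

-- v's parent chain reaches r
def pvReach (p : PySem.Dict Int Int) (r v : Int) : Prop := ∃ k, pvChain p k v = some r

-- correspondence between A's loop state (adj, f, t) and B's loop state (p, k)
structure pvCorr (adj : PySem.Dict Int (List Int)) (f t : PySem.Set Int)
    (p k : PySem.Dict Int Int) : Prop where
  c1 : ∀ w u, w ∈ adj.getD u [] ↔ p.get? w = some u
  c2 : ∀ w, w ∈ f ↔ (p.get? w).isSome = true
  c3 : ∀ x, x ∈ t ↔ ((p.get? x).isSome = true ∨ (k.get? x).isSome = true)
  c4 : ∀ u, ((adj.getD u []).length : Int) = k.getD u 0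
  c5 : ∀ u, (adj.getD u []).Nodup
  c7 : ∀ w u, p.get? w = some u → (k.get? u).isSome = true
  c8 : ∀ w, p.get? w ≠ some w
  fn : f.Nodup
  tn : t.Nodup

-- Phase 1: the two edge loops fail together, and on success the states correspond
theorem pvPhase1 : ∀ (es : List (Int × Int)) adj f t p k, pvCorr adj f t p k →
    (pvA_loop es adj f t = none ∧ pvB_loop es p k = none) ∨
    (∃ adj' f' t' p' k', pvA_loop es adj f t = some (adj', f', t') ∧
      pvB_loop es p k = some (p', k') ∧ pvCorr adj' f' t' p' k') := by
  intro es
  induction es with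
  | nil =>
    intro adj f t p k hc
    right; exact ⟨adj, f, t, p, k, rfl, rfl, hc⟩
  | cons e rest ih =>
    intro adj f t p k hc
    obtain ⟨pai, filho⟩ := e
    by_cases hself : pai = filho
    · left; constructor <;> simp [pvA_loop, pvB_loop, hself]
    · have hcond : PySem.Set.contains f filho = (p.get? filho).isSome := by
        by_cases hd : (p.get? filho).isSome = true
        · rw [hd]; exact (PySem.Set.contains_iff f filho).mpr ((hc.c2 filho).mpr hd)
        · have hnm : filho ∉ f := fun hm => hd ((hc.c2 filho).mp hm)
          rw [Bool.eq_false_iff.mpr hd]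
          rw [← Bool.not_eq_true]
          exact fun hcon => hnm ((PySem.Set.contains_iff f filho).mp hcon)
      by_cases hdup : (p.get? filho).isSome = true
      · have hmem : filho ∈ f := (hc.c2 filho).mpr hdup
        left
        constructor
        · simp [pvA_loop, hself, hmem]
        · simp [pvB_loop, hself, hdup]
      · have hfresh : p.get? filho = none := by
          cases hp : p.get? filho with
          | none => rfl
          | some u => rw [hp] at hdup; simp at hdup
        have hnm : filho ∉ f := fun hm => hdup ((hc.c2 filho).mp hm)
        have hgA : ∀ u, (adj.insert pai (adj.getD pai [] ++ [filho])).getD u [] =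
            if u = pai then adj.getD pai [] ++ [filho] else adj.getD u [] := by
          intro u; exact PySem.Dict.getD_insert adj pai u (adj.getD pai [] ++ [filho]) []
        have hgP : ∀ w, (p.insert filho pai).get? w =
            if w = filho then some pai else p.get? w := by
          intro w; exact PySem.Dict.get?_insert p filho w pai
        have hgK : ∀ u, (k.insert pai (k.getD pai 0 + 1)).get? u =
            if u = pai then some (k.getD pai 0 + 1) else k.get? u := by
          intro u; exact PySem.Dict.get?_insert k pai u (k.getD pai 0 + 1)
        have hgKD : ∀ u, (k.insert pai (k.getD pai 0 + 1)).getD u 0 =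
            if u = pai then k.getD pai 0 + 1 else k.getD u 0 := by
          intro u; exact PySem.Dict.getD_insert k pai u (k.getD pai 0 + 1) 0
        have hcnteq : (2 < (k.insert pai (k.getD pai 0 + 1)).getD pai 0) ↔
            (2 < ((adj.insert pai (adj.getD pai [] ++ [filho])).getD pai []).length) := by
          rw [hgKD pai, hgA pai, if_pos rfl, if_pos rfl]
          rw [List.length_append, List.length_singleton, ← hc.c4 pai]
          omega
        have hcorr' : pvCorr (adj.insert pai (adj.getD pai [] ++ [filho]))
            (PySem.Set.add f filho) (PySem.Set.add (PySem.Set.add t pai) filho)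
            (p.insert filho pai) (k.insert pai (k.getD pai 0 + 1)) := by
          constructor
          · -- c1
            intro w u
            rw [hgA u, hgP w]
            by_cases hu : u = pai
            · rw [if_pos hu]
              by_cases hw : w = filho
              · rw [if_pos hw, hu]
                simp [hw]
              · rw [if_neg hw, hu]
                simp only [List.mem_append, List.mem_singleton]
                constructor
                · rintro (hm | hm)
                  · exact (hc.c1 w pai).mp hm
                  · exact absurd hm hw
                · intro hm; exact Or.inl ((hc.c1 w pai).mpr hm)
            · rw [if_neg hu]
              by_cases hw : w = filho
              · rw [if_pos hw]
                constructor
                · intro hm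
                  have hx := (hc.c1 w u).mp hm
                  rw [hw, hfresh] at hx
                  exact absurd hx (by simp)
                · intro hm
                  exact absurd (Option.some.inj hm) (fun h => hu h.symm)
              · rw [if_neg hw]; exact hc.c1 w u
          · -- c2
            intro w
            rw [PySem.Set.mem_add, hgP w]
            by_cases hw : w = filho
            · rw [if_pos hw]; simp [hw]
            · rw [if_neg hw]
              constructor
              · rintro (hm | hm)
                · exact (hc.c2 w).mp hm
                · exact absurd hm hw
              · intro hm; exact Or.inl ((hc.c2 w).mpr hm)
          · -- c3
            intro x
            rw [PySem.Set.mem_add, PySem.Set.mem_add, hgP x, hgK x]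
            by_cases hx1 : x = filho
            · rw [if_pos hx1]; simp [hx1]
            · rw [if_neg hx1]
              by_cases hx2 : x = pai
              · rw [if_pos hx2]; simp [hx2]
              · rw [if_neg hx2]
                simp only [hc.c3 x]
                tauto
          · -- c4
            intro u
            rw [hgA u, hgKD u]
            by_cases hu : u = pai
            · rw [if_pos hu, if_pos hu, List.length_append, List.length_singleton]
              push_cast
              rw [hc.c4 pai]
            · rw [if_neg hu, if_neg hu]; exact hc.c4 u
          · -- c5
            intro u
            rw [hgA u]
            by_cases hu : u = pai
            · rw [if_pos hu]
              refine List.Nodup.append (hc.c5 pai) (List.nodup_singleton filho) ?_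
              intro a ha hb
              rw [List.mem_singleton] at hb
              have hx := (hc.c1 a pai).mp ha
              rw [hb, hfresh] at hx
              exact absurd hx (by simp)
            · rw [if_neg hu]; exact hc.c5 u
          · -- c7
            intro w u hw
            rw [hgP w] at hw
            rw [hgK u]
            by_cases hwf : w = filho
            · rw [if_pos hwf] at hw
              rw [if_pos (Option.some.inj hw).symm]; simp
            · rw [if_neg hwf] at hw
              by_cases hu : u = pai
              · rw [if_pos hu]; simp
              · rw [if_neg hu]; exact hc.c7 w u hw
          · -- c8
            intro w
            rw [hgP w]
            by_cases hwf : w = filho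
            · rw [if_pos hwf, hwf]
              intro hcon
              exact hself (Option.some.inj hcon)
            · rw [if_neg hwf]; exact hc.c8 w
          · exact PySem.Set.nodup_add f filho hc.fn
          · exact PySem.Set.nodup_add (t.add pai) filho (PySem.Set.nodup_add t pai hc.tn)
        by_cases hcnt : 2 < ((adj.insert pai (adj.getD pai [] ++ [filho])).getD pai []).length
        · left
          have hlenA : ¬ ((adj.getD pai []).length ≤ 1) := by
            have h2 := hcnt
            rw [hgA pai, if_pos rfl, List.length_append, List.length_singleton] at h2
            omega
          have hlenB : ¬ (k.getD pai 0 ≤ 1) := by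
            have h2 := hcnteq.mpr hcnt
            rw [hgKD pai, if_pos rfl] at h2
            omega
          constructor
          · simp [pvA_loop, hself, hnm]
            intro h; exact absurd h hlenA
          · simp [pvB_loop, hself, hdup]
            intro h; exact absurd h hlenB
        · have hcntB : ¬ (2 < (k.insert pai (k.getD pai 0 + 1)).getD pai 0) :=
            fun h => hcnt (hcnteq.mp h)
          have hlen2 : (adj.getD pai []).length ≤ 1 := by
            have h2 := hcnt
            rw [hgA pai, if_pos rfl, List.length_append, List.length_singleton] at h2
            omega
          have hlenB2 : k.getD pai 0 ≤ 1 := by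
            have h2 := hcntB
            rw [hgKD pai, if_pos rfl] at h2
            omega
          have hA : pvA_loop ((pai, filho) :: rest) adj f t =
              pvA_loop rest (adj.insert pai (adj.getD pai [] ++ [filho]))
                (PySem.Set.add f filho) (PySem.Set.add (PySem.Set.add t pai) filho) := by
            simp [pvA_loop, hself, hnm]
            intro h; omega
          have hB : pvB_loop ((pai, filho) :: rest) p k =
              pvB_loop rest (p.insert filho pai) (k.insert pai (k.getD pai 0 + 1)) := by
            simp [pvB_loop, hself, hdup]
            intro h; omega
          rw [hA, hB]
          exact ih _ _ _ _ _ hcorr'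

theorem pvReach_step (p : PySem.Dict Int Int) (r v u : Int)
    (hp : p.get? v = some u) (h : pvReach p r u) : pvReach p r v := by
  obtain ⟨k, hk⟩ := h
  exact ⟨k + 1, by show (p.get? v).bind (pvChain p k) = some r; rw [hp]; exact hk⟩

theorem pvClose (p : PySem.Dict Int Int) (r : Int) (vis : PySem.Set Int)
    (hcl : ∀ w u, p.get? w = some u → u ∈ vis → w ∈ vis) (hrv : r ∈ vis) :
    ∀ (k : Nat) (v : Int), pvChain p k v = some r → v ∈ vis := by
  intro k
  induction k with
  | zero => intro v hv; exact (Option.some.inj hv) ▸ hrv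
  | succ k ihk =>
    intro v hv
    cases hp : p.get? v with
    | none => rw [show pvChain p (k+1) v = (p.get? v).bind (pvChain p k) from rfl, hp] at hv
              simp at hv
    | some u =>
      rw [show pvChain p (k+1) v = (p.get? v).bind (pvChain p k) from rfl, hp] at hv
      exact hcl v u hp (ihk u hv)

theorem pvInner_eq (vis : PySem.Set Int) (fila : List Int) :
    ∀ (ws : List Int), ws.Nodup → (∀ w ∈ ws, w ∉ vis) →
      pvA_inner vis fila ws = some (vis ++ ws, fila ++ ws) := by
  intro ws
  induction ws generalizing vis fila with
  | nil => intro _ _; simp [pvA_inner]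
  | cons w ws ihw =>
    intro hnd hnv
    have hwnv : w ∉ vis := hnv w List.mem_cons_self
    have hcf : ¬ (PySem.Set.contains vis w = true) := by
      rw [PySem.Set.contains_iff]; exact hwnv
    show (if PySem.Set.contains vis w then none else
      pvA_inner (PySem.Set.add vis w) (fila ++ [w]) ws) = _
    rw [if_neg hcf, PySem.Set.add_of_not_mem hwnv]
    have hnv' : ∀ x ∈ ws, x ∉ vis ++ [w] := by
      intro x hx hmem
      rcases List.mem_append.mp hmem with hm | hm
      · exact hnv x (List.mem_cons_of_mem w hx) hm
      · exact (List.nodup_cons.mp hnd).1 ((List.mem_singleton.mp hm) ▸ hx)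
    rw [ihw (vis ++ [w]) (fila ++ [w]) (List.nodup_cons.mp hnd).2 hnv']
    simp

-- BFS invariant
structure pvInvB (p : PySem.Dict Int Int) (t : PySem.Set Int) (r : Int)
    (vis : PySem.Set Int) (fila : List Int) : Prop where
  visn : vis.Nodup
  filan : fila.Nodup
  fsub : ∀ x ∈ fila, x ∈ vis
  vsub : ∀ x ∈ vis, x ∈ t
  rin : r ∈ vis
  h2 : ∀ w ∈ vis, w = r ∨ ∃ u, p.get? w = some u ∧ u ∈ vis ∧ u ∉ fila
  h3 : ∀ w ∈ vis, pvReach p r w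
  h4 : ∀ w u, p.get? w = some u → u ∈ vis → u ∉ fila → w ∈ vis

theorem pvBfs_iff (adj : PySem.Dict Int (List Int)) (f t : PySem.Set Int)
    (p k : PySem.Dict Int Int) (r : Int) (hc : pvCorr adj f t p k)
    (hr : p.get? r = none) :
    ∀ (fuel : Nat) (vis : PySem.Set Int) (fila : List Int), pvInvB p t r vis fila →
      fila.length + (t.length - vis.length) + 1 ≤ fuel →
      (pvA_bfs adj t fuel vis fila = true ↔ ∀ v ∈ t, pvReach p r v) := by
  intro fuel
  induction fuel with
  | zero => intro vis fila _ hfuel; omega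
  | succ fuel ih =>
    intro vis fila inv hfuel
    cases fila with
    | nil =>
      show ((vis.length == t.length) = true ↔ _)
      rw [beq_iff_eq]
      constructor
      · intro hlen v hv
        have hperm : vis.Perm t :=
          (inv.visn.subperm inv.vsub).perm_of_length_le (le_of_eq hlen.symm)
        exact inv.h3 v (hperm.mem_iff.mpr hv)
      · intro hall
        have hcl : ∀ w u, p.get? w = some u → u ∈ vis → w ∈ vis := by
          intro w u hw hu
          exact inv.h4 w u hw hu (List.not_mem_nil)
        have htv : ∀ v ∈ t, v ∈ vis := by
          intro v hv
          obtain ⟨n, hn⟩ := hall v hv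
          exact pvClose p r vis hcl inv.rin n v hn
        exact ((List.perm_ext_iff_of_nodup inv.visn hc.tn).mpr
          (fun a => ⟨fun h => inv.vsub a h, fun h => htv a h⟩)).length_eq
    | cons u rest =>
      have hwsP : ∀ w ∈ adj.getD u [], p.get? w = some u := fun w hw => (hc.c1 w u).mp hw
      have hwsnv : ∀ w ∈ adj.getD u [], w ∉ vis := by
        intro w hw hin
        rcases inv.h2 w hin with hwr | ⟨u', hpu', hu'vis, hu'nf⟩
        · have h1 := hwsP w hw
          rw [hwr, hr] at h1
          simp at h1
        · have : u' = u := Option.some.inj ((hpu'.symm).trans (hwsP w hw))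
          exact hu'nf (this ▸ List.mem_cons_self)
      have hinner := pvInner_eq vis rest (adj.getD u []) (hc.c5 u) hwsnv
      show (match pvA_inner vis rest (adj.getD u []) with
            | none => false
            | some (vis', fila') => pvA_bfs adj t fuel vis' fila') = true ↔ _
      rw [hinner]
      have hvsub' : ∀ x ∈ vis ++ adj.getD u [], x ∈ t := by
        intro x hx
        rcases List.mem_append.mp hx with hx | hx
        · exact inv.vsub x hx
        · exact (hc.c3 x).mpr (Or.inl (by rw [hwsP x hx]; rfl))
      have hvisn' : (vis ++ adj.getD u []).Nodup :=
        List.Nodup.append inv.visn (hc.c5 u) (fun a ha hb => hwsnv a hb ha)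
      have hlen' : (vis ++ adj.getD u []).length ≤ t.length :=
        (hvisn'.subperm hvsub').length_le
      have inv' : pvInvB p t r (vis ++ adj.getD u []) (rest ++ adj.getD u []) := by
        constructor
        · exact hvisn'
        · refine List.Nodup.append (inv.filan.of_cons) (hc.c5 u) ?_
          intro a ha hb
          exact hwsnv a hb (inv.fsub a (List.mem_cons_of_mem u ha))
        · intro x hx
          rcases List.mem_append.mp hx with hx | hx
          · exact List.mem_append_left _ (inv.fsub x (List.mem_cons_of_mem u hx))
          · exact List.mem_append_right _ hx
        · exact hvsub'
        · exact List.mem_append_left _ inv.rin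
        · intro w hw
          rcases List.mem_append.mp hw with hw | hw
          · rcases inv.h2 w hw with hwr | ⟨u', hpu', hu'vis, hu'nf⟩
            · exact Or.inl hwr
            · refine Or.inr ⟨u', hpu', List.mem_append_left _ hu'vis, ?_⟩
              intro hmem
              rcases List.mem_append.mp hmem with hm | hm
              · exact hu'nf (List.mem_cons_of_mem u hm)
              · exact hwsnv u' hm hu'vis
          · refine Or.inr ⟨u, hwsP w hw, List.mem_append_left _ (inv.fsub u List.mem_cons_self), ?_⟩
            intro hmem
            rcases List.mem_append.mp hmem with hm | hm
            · exact (List.nodup_cons.mp inv.filan).1 hm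
            · exact hc.c8 u (hwsP u hm)
        · intro w hw
          rcases List.mem_append.mp hw with hw | hw
          · exact inv.h3 w hw
          · exact ⟨_, by
              show pvChain p (Classical.choose (inv.h3 u (inv.fsub u List.mem_cons_self)) + 1) w = some r
              show (p.get? w).bind (pvChain p _) = some r
              rw [hwsP w hw]
              exact Classical.choose_spec (inv.h3 u (inv.fsub u List.mem_cons_self))⟩
        · intro w u' hp hu' hn
          rcases List.mem_append.mp hu' with hu'v | hu'w
          · by_cases huu : u' = u
            · refine List.mem_append_right _ ?_
              exact (hc.c1 w u).mpr (huu ▸ hp)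
            · refine List.mem_append_left _ ?_
              refine inv.h4 w u' hp hu'v ?_
              intro hm
              rcases List.mem_cons.mp hm with hm | hm
              · exact huu hm
              · exact hn (List.mem_append_left _ hm)
          · exact absurd (List.mem_append_right _ hu'w) hn
      refine (ih (vis ++ adj.getD u []) (rest ++ adj.getD u []) inv' ?_)
      simp only [List.length_append, List.length_cons] at hlen' hfuel ⊢
      omega

theorem pvChain_add (p : PySem.Dict Int Int) :
    ∀ (i j : Nat) (v : Int), pvChain p (i + j) v = (pvChain p i v).bind (pvChain p j) := by
  intro i
  induction i with
  | zero => intro j v; rw [Nat.zero_add]; rfl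
  | succ i ihi =>
    intro j v
    have : i + 1 + j = (i + j) + 1 := by omega
    rw [this]
    show (p.get? v).bind (pvChain p (i + j)) = ((p.get? v).bind (pvChain p i)).bind (pvChain p j)
    cases hp : p.get? v with
    | none => rfl
    | some u => exact ihi j u

theorem pvClimb_self (p : PySem.Dict Int Int) (r : Int) :
    ∀ (m : Nat), pvB_climb p r m r = r := by
  intro m
  cases m with
  | zero => rfl
  | succ m => show (if r = r then r else _) = r; rw [if_pos rfl]

theorem pvClimb_of_chain (p : PySem.Dict Int Int) (r : Int) :
    ∀ (kk : Nat) (v : Int), pvChain p kk v = some r → ∀ (m : Nat), kk ≤ m →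
      pvB_climb p r m v = r := by
  intro kk
  induction kk with
  | zero =>
    intro v hv m _
    rw [Option.some.inj hv]
    exact pvClimb_self p r m
  | succ kk ihk =>
    intro v hv m hm
    match m with
    | m' + 1 =>
      by_cases hvr : v = r
      · rw [hvr]; exact pvClimb_self p r (m' + 1)
      · rw [show pvB_climb p r (m' + 1) v = if v = r then v else pvB_climb p r m' (p.getD v v) from rfl,
          if_neg hvr]
        rw [show pvChain p (kk + 1) v = (p.get? v).bind (pvChain p kk) from rfl] at hv
        cases hp : p.get? v with
        | none => rw [hp] at hv; simp at hv
        | some u =>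
          rw [hp] at hv
          rw [PySem.Dict.getD_of_get?_eq_some p v hp]
          exact ihk u hv m' (by omega)

theorem pvChain_mem (t : PySem.Set Int) (p : PySem.Dict Int Int)
    (hvals : ∀ w u, p.get? w = some u → u ∈ t) :
    ∀ (i : Nat) (v x : Int), v ∈ t → pvChain p i v = some x → x ∈ t := by
  intro i
  induction i with
  | zero => intro v x hv hx; exact (Option.some.inj hx) ▸ hv
  | succ i ihi =>
    intro v x hv hx
    rw [show pvChain p (i + 1) v = (p.get? v).bind (pvChain p i) from rfl] at hx
    cases hp : p.get? v with
    | none => rw [hp] at hx; simp at hx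
    | some u =>
      rw [hp] at hx
      exact ihi u x (hvals v u hp) hx

theorem pvChain_prefix (p : PySem.Dict Int Int) (r : Int) :
    ∀ (kk i : Nat) (v : Int), pvChain p kk v = some r → i ≤ kk →
      ∃ x, pvChain p i v = some x := by
  intro kk i v hk hi
  have : kk = i + (kk - i) := by omega
  rw [this, pvChain_add] at hk
  cases hx : pvChain p i v with
  | none => rw [hx] at hk; simp at hk
  | some x => exact ⟨x, rfl⟩

theorem pvShrink (t : PySem.Set Int) (p : PySem.Dict Int Int) (r : Int)
    (hvals : ∀ w u, p.get? w = some u → u ∈ t) (hnd : t.Nodup) :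
    ∀ (kk : Nat) (v : Int), pvChain p kk v = some r → v ∈ t →
      ∃ j, j ≤ t.length ∧ pvChain p j v = some r := by
  intro kk
  induction kk using Nat.strong_induction_on with
  | _ kk ihk =>
    intro v hk hv
    by_cases hle : kk ≤ t.length
    · exact ⟨kk, hle, hk⟩
    · rw [Nat.not_le] at hle
      -- pigeonhole: the first t.length+1 chain values live in t, so two coincide
      have hg : ∀ i ∈ Finset.range (t.length + 1), ∃ x, pvChain p i v = some x :=
        fun i hi => pvChain_prefix p r kk i v hk (by
          have := Finset.mem_range.mp hi; omega)
      classical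
      let g : Nat → Int := fun i => (pvChain p i v).getD 0
      have hgi : ∀ i ∈ Finset.range (t.length + 1), pvChain p i v = some (g i) := by
        intro i hi
        obtain ⟨x, hx⟩ := hg i hi
        show pvChain p i v = some ((pvChain p i v).getD 0)
        rw [hx]
        rfl
      have hmaps : ∀ i ∈ Finset.range (t.length + 1), g i ∈ t.toFinset := by
        intro i hi
        rw [List.mem_toFinset]
        exact pvChain_mem t p hvals i v (g i) hv (hgi i hi)
      have hcard : t.toFinset.card < (Finset.range (t.length + 1)).card := by
        rw [Finset.card_range, List.toFinset_card_of_nodup hnd]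
        omega
      obtain ⟨i, hi, j, hj, hne, heq⟩ :=
        Finset.exists_ne_map_eq_of_card_lt_of_maps_to hcard hmaps
      have key : ∀ a b, a < b → b < t.length + 1 → g a = g b →
          ∃ j', j' ≤ t.length ∧ pvChain p j' v = some r := by
        intro a b hab hbn hgab
        have hbk : b ≤ kk := by omega
        have hsplit : kk = b + (kk - b) := by omega
        rw [hsplit, pvChain_add, hgi b (Finset.mem_range.mpr hbn)] at hk
        simp only [Option.bind_some] at hk
        have hshort : pvChain p (a + (kk - b)) v = some r := by
          rw [pvChain_add, hgi a (Finset.mem_range.mpr (by omega))]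
          simp only [Option.bind_some]
          rw [hgab]; exact hk
        exact ihk (a + (kk - b)) (by omega) v hshort hv
      rcases Nat.lt_or_ge i j with hij | hij
      · exact key i j hij (Finset.mem_range.mp hj) heq
      · exact key j i (lt_of_le_of_ne hij (fun h => hne h.symm)) (Finset.mem_range.mp hi) heq.symm

theorem pvClimb_iff (t : PySem.Set Int) (p : PySem.Dict Int Int) (r : Int)
    (hvals : ∀ w u, p.get? w = some u → u ∈ t)
    (hG5 : ∀ v ∈ t, v ≠ r → (p.get? v).isSome = true)
    (hnd : t.Nodup)
    (v : Int) (hv : v ∈ t) :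
    pvB_climb p r t.length v = r ↔ pvReach p r v := by
  constructor
  · -- climb hits the root ⇒ reachable
    suffices h : ∀ (m : Nat) (w : Int), w ∈ t → pvB_climb p r m w = r → pvReach p r w from
      h t.length v hv
    intro m
    induction m with
    | zero =>
      intro w hw hcl
      exact ⟨0, by rw [show pvB_climb p r 0 w = w from rfl] at hcl; rw [hcl]; rfl⟩
    | succ m ihm =>
      intro w hw hcl
      by_cases hwr : w = r
      · exact ⟨0, by rw [hwr]; rfl⟩
      · rw [show pvB_climb p r (m+1) w = if w = r then w else pvB_climb p r m (p.getD w w) from rfl,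
          if_neg hwr] at hcl
        have hsome : (p.get? w).isSome = true := hG5 w hw hwr
        cases hp : p.get? w with
        | none => rw [hp] at hsome; simp at hsome
        | some u =>
          have hgd : p.getD w w = u := PySem.Dict.getD_of_get?_eq_some p w hp
          rw [hgd] at hcl
          exact pvReach_step p r w u hp (ihm u (hvals w u hp) hcl)
  · -- reachable ⇒ climb hits the root
    rintro ⟨kk, hk⟩
    obtain ⟨j, hj, hcj⟩ := pvShrink t p r hvals hnd kk v hk hv
    exact pvClimb_of_chain p r j v hcj t.length hj

theorem pvKeys_isSome {ν : Type} (d : PySem.Dict Int ν) (x : Int) :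
    x ∈ d.keys ↔ (d.get? x).isSome = true := by
  rw [Option.isSome_iff_ne_none]
  constructor
  · intro hm hn; exact (PySem.Dict.get?_eq_none_iff_not_mem_keys d x).mp hn hm
  · intro hne
    cases ho : d.get? x with
    | none => exact absurd ho hne
    | some v =>
      exact PySem.Dict.mem_keys_of_mem_items d (PySem.Dict.mem_items_of_get?_eq_some d ho)

theorem pvMain : ∀ (arestas : List (Int × Int)),
    validar_arvore_binaria arestas = validar_arvore_binaria_alt arestas := by
  intro arestas
  by_cases hnil : arestas = []
  · rw [validar_arvore_binaria, validar_arvore_binaria_alt, if_pos hnil, if_pos hnil]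
  · rw [validar_arvore_binaria, validar_arvore_binaria_alt, if_neg hnil, if_neg hnil]
    have hc0 : pvCorr PySem.Dict.empty PySem.Set.empty PySem.Set.empty
        PySem.Dict.empty PySem.Dict.empty := by
      constructor <;>
        simp [PySem.Dict.getD_empty, PySem.Dict.get?_empty, PySem.Set.empty, List.Nodup]
    rcases pvPhase1 arestas _ _ _ _ _ hc0 with ⟨hA, hB⟩ | ⟨adj, f, t, p, k, hA, hB, hc⟩
    · rw [hA, hB]
    · rw [hA, hB]
      show (if (PySem.Set.diff t f).length ≠ 1 then false
            else pvA_bfs adj t (t.length + 1)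
              (PySem.Set.add PySem.Set.empty ((PySem.Set.diff t f).headD 0))
              [(PySem.Set.diff t f).headD 0]) =
           (if ((PySem.Set.union (PySem.Set.ofList p.keys) k.keys).filter
                  (fun n => !(p.contains n))).length ≠ 1 then false
            else (PySem.Set.union (PySem.Set.ofList p.keys) k.keys).all
              (fun n => pvB_climb p
                (((PySem.Set.union (PySem.Set.ofList p.keys) k.keys).filter
                  (fun n => !(p.contains n))).headD 0)
                (PySem.Set.union (PySem.Set.ofList p.keys) k.keys).length n ==
                (((PySem.Set.union (PySem.Set.ofList p.keys) k.keys).filter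
                  (fun n => !(p.contains n))).headD 0)))
      set nodes := PySem.Set.union (PySem.Set.ofList p.keys) k.keys with hnodes
      set rzA := PySem.Set.diff t f with hrzA
      set rzB := nodes.filter (fun n => !(p.contains n)) with hrzB
      have hnodes_mem : ∀ x, x ∈ nodes ↔ x ∈ t := by
        intro x
        rw [hnodes, PySem.Set.mem_union, PySem.Set.mem_ofList, pvKeys_isSome p x,
          pvKeys_isSome k x, hc.c3 x]
      have hnodesnd : nodes.Nodup := PySem.Set.nodup_union _ _ (PySem.Set.nodup_ofList _)
      have hperm : t.Perm nodes :=
        (List.perm_ext_iff_of_nodup hc.tn hnodesnd).mpr (fun a => (hnodes_mem a).symm)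
      have hrz_mem : ∀ x, x ∈ rzA ↔ x ∈ rzB := by
        intro x
        rw [hrzA, PySem.Set.mem_diff, hrzB, List.mem_filter, hnodes_mem x, hc.c2 x]
        simp [PySem.Dict.contains_eq_isSome_get?]
      have hrzAnd : rzA.Nodup := PySem.Set.nodup_diff t f hc.tn
      have hrzBnd : rzB.Nodup := hnodesnd.filter _
      have hrzperm : rzA.Perm rzB :=
        (List.perm_ext_iff_of_nodup hrzAnd hrzBnd).mpr hrz_mem
      have hrzlen : rzA.length = rzB.length := hrzperm.length_eq
      by_cases hlen1 : rzA.length = 1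
      · rw [if_neg (by omega), if_neg (by omega)]
        obtain ⟨rA, hrA⟩ := List.length_eq_one_iff.mp hlen1
        obtain ⟨rB, hrB⟩ := List.length_eq_one_iff.mp (hrzlen ▸ hlen1)
        have hrAB : rA = rB := by
          have := hrzperm.mem_iff.mp (by rw [hrA]; exact List.mem_cons_self)
          rw [hrB] at this
          exact List.mem_singleton.mp this
        rw [hrA, hrB, ← hrAB]
        show pvA_bfs adj t (t.length + 1) (PySem.Set.add PySem.Set.empty rA) [rA] =
          nodes.all (fun n => pvB_climb p rA nodes.length n == rA)
        have hrin : rA ∈ rzA := by rw [hrA]; exact List.mem_cons_self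
        have hrt : rA ∈ t := (PySem.Set.mem_diff t f rA).mp hrin |>.1
        have hrnf : rA ∉ f := (PySem.Set.mem_diff t f rA).mp hrin |>.2
        have hrnone : p.get? rA = none := by
          cases ho : p.get? rA with
          | none => rfl
          | some u =>
            exact absurd ((hc.c2 rA).mpr (by rw [ho]; rfl)) hrnf
        have hG5 : ∀ v ∈ t, v ≠ rA → (p.get? v).isSome = true := by
          intro v hv hvr
          by_contra hns
          have hvnf : v ∉ f := fun hm => hns ((hc.c2 v).mp hm)
          have : v ∈ rzA := (PySem.Set.mem_diff t f v).mpr ⟨hv, hvnf⟩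
          rw [hrA] at this
          exact hvr (List.mem_singleton.mp this)
        have hvals : ∀ w u, p.get? w = some u → u ∈ t := by
          intro w u hw
          exact (hc.c3 u).mpr (Or.inr (hc.c7 w u hw))
        have hvis0 : PySem.Set.add PySem.Set.empty rA = [rA] :=
          PySem.Set.add_of_not_mem (List.not_mem_nil)
        have hinv : pvInvB p t rA [rA] [rA] := by
          constructor
          · exact List.nodup_singleton rA
          · exact List.nodup_singleton rA
          · intro x hx; exact hx
          · intro x hx; rw [List.mem_singleton.mp hx]; exact hrt
          · exact List.mem_cons_self
          · intro w hw; exact Or.inl (List.mem_singleton.mp hw)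
          · intro w hw; rw [List.mem_singleton.mp hw]; exact ⟨0, rfl⟩
          · intro w u _ hu hnf; exact absurd hu hnf
        have htpos : 1 ≤ t.length := List.length_pos_of_mem hrt
        have hbfs := pvBfs_iff adj f t p k rA hc hrnone (t.length + 1) [rA] [rA] hinv
          (by simp only [List.length_singleton]; omega)
        rw [hvis0]
        rw [Bool.eq_iff_iff, hbfs, List.all_eq_true]
        constructor
        · intro hall n hn
          rw [beq_iff_eq, ← hperm.length_eq]
          exact (pvClimb_iff t p rA hvals hG5 hc.tn n ((hnodes_mem n).mp hn)).mpr
            (hall n ((hnodes_mem n).mp hn))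
        · intro hall v hv
          have := hall v ((hnodes_mem v).mpr hv)
          rw [beq_iff_eq, ← hperm.length_eq] at this
          exact (pvClimb_iff t p rA hvals hG5 hc.tn v hv).mp this
      · rw [if_pos hlen1, if_pos (by omega)]

-- ===== VERDICT (by name: the statement is the Claim_ definition above) =====
theorem validar_arvore_binaria_spec : Claim_equal_validar_arvore_binaria := by
  intro arestas _
  show validar_arvore_binaria arestas = validar_arvore_binaria_alt arestas
  exact pvMain arestas
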